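-- pv_equiv track=rewrite | github.com/tn82/advent-of-code | 2023/day22/aoc.py | block_in_grid
-- ===== SOURCE A (Python) =====
-- def block_in_grid(block, grid, dz):
--     if block[0][2] + dz == 0 or block[1][2] + dz == 0:
--         return True # Floor
--     for x in range(block[0][0], block[1][0] + 1):
--         for y in range(block[0][1], block[1][1] + 1):
--             for z in range(block[0][2], block[1][2] + 1):
--                 if (x, y, z + dz) in grid:
--                     return True
--     return False
-- ===== SOURCE B (Python) =====
-- def block_in_grid(block, grid, dz):
--     if block[0][2] + dz == 0 or block[1][2] + dz == 0:
--         return True  # Floor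
--     for cell in grid:
--         if len(cell) == 3:
--             gx, gy, gz = cell
--             if (block[0][0] <= gx <= block[1][0]
--                     and block[0][1] <= gy <= block[1][1]
--                     and block[0][2] <= gz - dz <= block[1][2]):
--                 return True
--     return False
-- ===== Notes on version B (the rewrite author's own statement) =====
-- stated objective: alternative
-- what changed: Instead of enumerating every (x,y,z) cell of the box in a triple nested range loop and testing set membership of the shifted cell, B makes one pass over the occupied grid cells and checks whether each lies inside the dz-shifted box.
import Mathlib
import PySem

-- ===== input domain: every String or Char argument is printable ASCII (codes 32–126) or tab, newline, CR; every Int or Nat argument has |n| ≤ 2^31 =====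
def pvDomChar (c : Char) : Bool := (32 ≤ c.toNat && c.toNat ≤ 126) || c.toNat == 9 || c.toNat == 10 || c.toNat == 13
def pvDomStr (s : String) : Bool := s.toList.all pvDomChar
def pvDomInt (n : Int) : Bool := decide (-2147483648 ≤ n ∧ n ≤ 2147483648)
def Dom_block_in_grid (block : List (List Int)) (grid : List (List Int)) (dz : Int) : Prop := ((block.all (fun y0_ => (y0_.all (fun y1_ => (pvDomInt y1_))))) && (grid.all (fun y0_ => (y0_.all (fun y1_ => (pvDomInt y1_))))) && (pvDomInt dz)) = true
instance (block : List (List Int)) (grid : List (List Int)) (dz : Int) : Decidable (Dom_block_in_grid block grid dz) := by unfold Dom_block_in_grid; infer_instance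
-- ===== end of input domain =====

-- B replaces A's triple nested loop over all cells of the box (membership test per cell)
-- with a single pass over the occupied grid cells, testing each against the shifted box.

-- ===== PORT A =====
def block_in_grid (block : List (List Int)) (grid : List (List Int)) (dz : Int) : Bool :=
  match PySem.List.pyGet? block 0, PySem.List.pyGet? block 1 with
  | some b0, some b1 =>
    match PySem.List.pyGet? b0 0, PySem.List.pyGet? b0 1, PySem.List.pyGet? b0 2,
          PySem.List.pyGet? b1 0, PySem.List.pyGet? b1 1, PySem.List.pyGet? b1 2 with
    | some x0, some y0, some z0, some x1, some y1, some z1 =>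
      if z0 + dz == 0 || z1 + dz == 0 then true
      else
        (PySem.List.pyRange x0 (x1 + 1) 1).any fun x =>
          (PySem.List.pyRange y0 (y1 + 1) 1).any fun y =>
            (PySem.List.pyRange z0 (z1 + 1) 1).any fun z =>
              -- Python `(x, y, z+dz) in grid`: set membership by tuple equality; a 3-tuple
              -- equals exactly a 3-element row with the same components = list equality here
              grid.any fun c => c == [x, y, z + dz]
    | _, _, _, _, _, _ => false  -- IndexError; excluded by Pre_
  | _, _ => false  -- IndexError; excluded by Pre_

-- ===== PORT B =====
def bCorner (row : List Int) : Option (Int × Int × Int) :=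
  (PySem.List.pyGet? row 0).bind fun x =>
    (PySem.List.pyGet? row 1).bind fun y =>
      (PySem.List.pyGet? row 2).map fun z => (x, y, z)

def block_in_grid_alt (block : List (List Int)) (grid : List (List Int)) (dz : Int) : Bool :=
  ((((PySem.List.pyGet? block 0).bind bCorner).bind fun c0 =>
      ((PySem.List.pyGet? block 1).bind bCorner).map fun c1 =>
        if c0.2.2 + dz == 0 || c1.2.2 + dz == 0 then true
        else
          grid.any fun cell =>
            match cell with
            | [gx, gy, gz] =>
              c0.1 ≤ gx && gx ≤ c1.1 && c0.2.1 ≤ gy && gy ≤ c1.2.1 &&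
                c0.2.2 ≤ gz - dz && gz - dz ≤ c1.2.2
            | _ => false).getD false)  -- getD false unreachable under Pre_ (IndexError in Python)

-- ===== PRECONDITION & SPEC =====
-- A raises IndexError unless block has at least two rows and both rows have at least 3 entries.
def Pre_block_in_grid (block : List (List Int)) (grid : List (List Int)) (dz : Int) : Prop :=
  2 ≤ block.length ∧ 3 ≤ (block.getD 0 []).length ∧ 3 ≤ (block.getD 1 []).length
instance (block : List (List Int)) (grid : List (List Int)) (dz : Int) : Decidable (Pre_block_in_grid block grid dz) := by unfold Pre_block_in_grid; infer_instance
def pvWitness_block_in_grid : List (List Int) × List (List Int) × Int := ([[0,0,1],[0,0,1]], [], 0)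

def Spec_block_in_grid (block : List (List Int)) (grid : List (List Int)) (dz : Int) (out : Bool) : Prop := out = block_in_grid_alt block grid dz
instance (block : List (List Int)) (grid : List (List Int)) (dz : Int) (out : Bool) : Decidable (Spec_block_in_grid block grid dz out) := by unfold Spec_block_in_grid; infer_instance

-- ===== CLAIM (what is proved, stated in full; the proofs are below) =====
def Claim_equal_block_in_grid : Prop := ∀ (block : List (List Int)) (grid : List (List Int)) (dz : Int), Dom_block_in_grid block grid dz → Pre_block_in_grid block grid dz → Spec_block_in_grid block grid dz (block_in_grid block grid dz)

-- ===== LEMMAS AND PROOFS =====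

lemma block_in_grid_shape (x0 y0 z0 x1 y1 z1 : Int) (a b : List Int)
    (rest : List (List Int)) (grid : List (List Int)) (dz : Int) :
    block_in_grid ((x0 :: y0 :: z0 :: a) :: (x1 :: y1 :: z1 :: b) :: rest) grid dz
      = (if z0 + dz == 0 || z1 + dz == 0 then true
         else
           (PySem.List.pyRange x0 (x1 + 1) 1).any fun x =>
             (PySem.List.pyRange y0 (y1 + 1) 1).any fun y =>
               (PySem.List.pyRange z0 (z1 + 1) 1).any fun z =>
                 grid.any fun c => c == [x, y, z + dz]) := by
  have h : (0:Int) ≤ (rest.length:Int) + 1 := by positivity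
  have ha0 : (0:Int) ≤ (a.length:Int) + 1 + 1 := by positivity
  have ha1 : (0:Int) ≤ (a.length:Int) + 1 := by positivity
  have ha2 : (2:Int) ≤ (a.length:Int) + 1 + 1 := by omega
  have hb0 : (0:Int) ≤ (b.length:Int) + 1 + 1 := by positivity
  have hb1 : (0:Int) ≤ (b.length:Int) + 1 := by positivity
  have hb2 : (2:Int) ≤ (b.length:Int) + 1 + 1 := by omega
  simp only [block_in_grid]
  simp [PySem.List.pyGet?, PySem.List.pyIdx?, h, ha0, ha1, ha2, hb0, hb1, hb2]

lemma block_in_grid_alt_shape (x0 y0 z0 x1 y1 z1 : Int) (a b : List Int)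
    (rest : List (List Int)) (grid : List (List Int)) (dz : Int) :
    block_in_grid_alt ((x0 :: y0 :: z0 :: a) :: (x1 :: y1 :: z1 :: b) :: rest) grid dz
      = (if z0 + dz == 0 || z1 + dz == 0 then true
         else grid.any fun cell =>
           match cell with
           | [gx, gy, gz] =>
             x0 ≤ gx && gx ≤ x1 && y0 ≤ gy && gy ≤ y1 && z0 ≤ gz - dz && gz - dz ≤ z1
           | _ => false) := by
  have h : (0:Int) ≤ (rest.length:Int) + 1 := by positivity
  have ha0 : (0:Int) ≤ (a.length:Int) + 1 + 1 := by positivity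
  have ha1 : (0:Int) ≤ (a.length:Int) + 1 := by positivity
  have ha2 : (2:Int) ≤ (a.length:Int) + 1 + 1 := by omega
  have hb0 : (0:Int) ≤ (b.length:Int) + 1 + 1 := by positivity
  have hb1 : (0:Int) ≤ (b.length:Int) + 1 := by positivity
  have hb2 : (2:Int) ≤ (b.length:Int) + 1 + 1 := by omega
  simp only [block_in_grid_alt, bCorner]
  simp [PySem.List.pyGet?, PySem.List.pyIdx?, h, ha0, ha1, ha2, hb0, hb1, hb2]

-- Enumerating the box and looking each cell up in the grid finds a hit exactly when
-- some occupied cell lies inside the shifted box.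
lemma hits_iff (grid : List (List Int)) (x0 y0 z0 x1 y1 z1 dz : Int) :
    ((PySem.List.pyRange x0 (x1 + 1) 1).any fun x =>
       (PySem.List.pyRange y0 (y1 + 1) 1).any fun y =>
         (PySem.List.pyRange z0 (z1 + 1) 1).any fun z =>
           grid.any fun c => c == [x, y, z + dz])
    = (grid.any fun cell =>
        match cell with
        | [gx, gy, gz] =>
          x0 ≤ gx && gx ≤ x1 && y0 ≤ gy && gy ≤ y1 && z0 ≤ gz - dz && gz - dz ≤ z1
        | _ => false) := by
  rw [Bool.eq_iff_iff]
  simp only [List.any_eq_true, PySem.List.mem_pyRange_one, beq_iff_eq]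
  constructor
  · rintro ⟨x, ⟨hx0, hx1⟩, y, ⟨hy0, hy1⟩, z, ⟨hz0, hz1⟩, c, hc, rfl⟩
    refine ⟨[x, y, z + dz], hc, ?_⟩
    simp only [Bool.and_eq_true, decide_eq_true_eq]
    omega
  · rintro ⟨c, hc, h⟩
    match c with
    | [gx, gy, gz] =>
      simp only [Bool.and_eq_true, decide_eq_true_eq] at h
      obtain ⟨⟨⟨⟨⟨hgx0, hgx1⟩, hgy0⟩, hgy1⟩, hgz0⟩, hgz1⟩ := h
      refine ⟨gx, ⟨by omega, by omega⟩, gy, ⟨by omega, by omega⟩, gz - dz, ⟨by omega, by omega⟩,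
        [gx, gy, gz], hc, ?_⟩
      have : gz - dz + dz = gz := by omega
      rw [this]
    | [] => simp at h
    | [_] => simp at h
    | [_, _] => simp at h
    | _ :: _ :: _ :: _ :: _ => simp at h

-- ===== VERDICT (by name: the statement is the Claim_ definition above) =====
theorem block_in_grid_spec : Claim_equal_block_in_grid := by
  intro block grid dz _hdom hpre
  obtain ⟨hl, h0, h1⟩ := hpre
  match block, hl with
  | b0 :: b1 :: rest, _ =>
    simp only [List.getD, List.getElem?_cons_zero, List.getElem?_cons_succ,
      Option.getD_some] at h0 h1
    match b0, h0 with
    | x0 :: y0 :: z0 :: a, _ =>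
    match b1, h1 with
    | x1 :: y1 :: z1 :: b, _ =>
      show block_in_grid _ _ _ = block_in_grid_alt _ _ _
      rw [block_in_grid_shape, block_in_grid_alt_shape, hits_iff]
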